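-- pv_equiv track=rewrite | github.com/beznosov60-sys/Documents_bot | bot/utils/passport.py | _extract_after_keyword
-- ===== SOURCE A (Python) =====
-- from typing import Any, Dict, Iterable, List
--
-- def _extract_after_keyword(lines: List[str], keywords: Iterable[str]) -> str | None:
--     for idx, line in enumerate(lines):
--         lowered = line.lower()
--         if any(keyword in lowered for keyword in keywords):
--             for tail in lines[idx + 1 : idx + 3]:
--                 if any(keyword in tail.lower() for keyword in keywords):
--                     continue
--                 if _contains_digits(tail):
--                     continue
--                 return tail.strip()
--     return None
--
-- def _contains_digits(text: str) -> bool: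
--     return any(char.isdigit() for char in text)
-- ===== SOURCE B (Python) =====
-- from typing import Iterable, List
--
-- def _extract_after_keyword(lines: List[str], keywords: Iterable[str]) -> str | None:
--     window = 0  # how many more lines remain in the 2-line window after the last keyword line
--     for line in lines:
--         lowered = line.lower()
--         if any(keyword in lowered for keyword in keywords):
--             window = 2
--         elif window > 0:
--             window -= 1
--             if not any(char.isdigit() for char in line):
--                 return line.strip()
--     return None
-- ===== Notes on version B (the rewrite author's own statement) =====
-- stated objective: alternative
-- what changed: Replaces the outer index scan with a nested 2-line slice lookahead by a single forward pass that maintains an integer countdown window (reset to 2 on a keyword line, decremented otherwise), returning the first clean line while the window is open.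
import Mathlib
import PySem

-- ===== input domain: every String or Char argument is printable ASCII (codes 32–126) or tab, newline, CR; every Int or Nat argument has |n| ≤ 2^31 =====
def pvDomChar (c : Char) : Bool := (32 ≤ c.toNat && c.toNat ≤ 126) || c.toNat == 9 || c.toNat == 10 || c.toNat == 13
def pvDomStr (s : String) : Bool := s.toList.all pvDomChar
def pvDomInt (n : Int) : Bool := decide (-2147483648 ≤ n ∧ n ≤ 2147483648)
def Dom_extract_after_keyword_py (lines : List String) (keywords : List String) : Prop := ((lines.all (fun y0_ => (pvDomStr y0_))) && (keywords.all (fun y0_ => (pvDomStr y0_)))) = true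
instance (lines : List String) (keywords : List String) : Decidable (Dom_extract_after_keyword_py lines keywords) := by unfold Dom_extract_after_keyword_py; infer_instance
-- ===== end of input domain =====

-- ===== PORT A =====
-- header: B replaces A's index-and-slice lookahead by a single pass with a countdown window (alternative decomposition, same result).
-- any(keyword in line.lower() for keyword in keywords)
def pvMatchA (keywords : List String) (line : String) : Bool :=
  keywords.any (fun keyword => PySem.Str.isIn keyword (PySem.Str.lower line))

-- _contains_digits: any(char.isdigit() for char in text)
def pvDigitsA (text : String) : Bool :=
  text.toList.any PySem.Chars.isdigit

-- inner loop: for tail in lines[idx+1 : idx+3]: continue on keyword / digit lines, else return tail.strip()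
def pvInnerA (keywords : List String) : List String → Option String
  | [] => none
  | tail :: rest =>
    if pvMatchA keywords tail then pvInnerA keywords rest
    else if pvDigitsA tail then pvInnerA keywords rest
    else some (PySem.Str.strip tail)

-- outer loop over enumerate(lines); lines[idx+1:idx+3] (both bounds ≥ 0) = the next two lines = rest.take 2
def pvOuterA (keywords : List String) : List String → Option String
  | [] => none
  | line :: rest =>
    if pvMatchA keywords line then
      match pvInnerA keywords (rest.take 2) with
      | some r => some r
      | none => pvOuterA keywords rest
    else pvOuterA keywords rest

def extract_after_keyword_py (lines : List String) (keywords : List String) : Option String :=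
  pvOuterA keywords lines

-- ===== PORT B =====
-- single pass with a countdown window (Source B): keyword line → window := 2; else inside window: decrement, skip digit lines, return line.strip()
def pvLoopB (keywords : List String) : List String → Nat → Option String
  | [], _ => none
  | line :: rest, window =>
    let lowered := PySem.Str.lower line
    if keywords.any (fun keyword => PySem.Str.isIn keyword lowered) then
      pvLoopB keywords rest 2
    else if window > 0 then
      if line.toList.any PySem.Chars.isdigit then pvLoopB keywords rest (window - 1)
      else some (PySem.Str.strip line)
    else
      pvLoopB keywords rest window

def extract_after_keyword_py_alt (lines : List String) (keywords : List String) : Option String :=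
  pvLoopB keywords lines 0

-- ===== PRECONDITION & SPEC =====
def Spec_extract_after_keyword_py (lines : List String) (keywords : List String) (out : Option String) : Prop := out = extract_after_keyword_py_alt lines keywords
instance (lines : List String) (keywords : List String) (out : Option String) : Decidable (Spec_extract_after_keyword_py lines keywords out) := by unfold Spec_extract_after_keyword_py; infer_instance

-- ===== CLAIM (what is proved, stated in full; the proofs are below) =====
def Claim_equal_extract_after_keyword_py : Prop := ∀ (lines : List String) (keywords : List String), Dom_extract_after_keyword_py lines keywords → Spec_extract_after_keyword_py lines keywords (extract_after_keyword_py lines keywords)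

-- ===== LEMMAS AND PROOFS =====

-- A's state after seeing a keyword line `cd` lines ago: first try the remaining window, else the outer scan.
def pvG (keywords : List String) (rest : List String) (cd : Nat) : Option String :=
  match pvInnerA keywords (rest.take cd) with
  | some r => some r
  | none => pvOuterA keywords rest

-- the inner scan is monotone in the window length: a hit in a shorter prefix is a hit in a longer one
theorem pvInnerA_mono (keywords : List String) (xs : List String) (k m : Nat) (hkm : k ≤ m)
    (r : String) (h : pvInnerA keywords (xs.take k) = some r) :
    pvInnerA keywords (xs.take m) = some r := by
  induction xs generalizing k m with
  | nil => simpa using h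
  | cons x xs ih =>
    cases k with
    | zero => simp [pvInnerA] at h
    | succ k =>
      cases m with
      | zero => omega
      | succ m =>
        simp only [List.take_succ_cons, pvInnerA] at h ⊢
        split at h
        · rw [if_pos (by assumption)]; exact ih k m (by omega) h
        · split at h
          · rw [if_neg (by assumption), if_pos (by assumption)]; exact ih k m (by omega) h
          · rw [if_neg (by assumption), if_neg (by assumption)]; exact h

theorem pvLoopB_eq_pvG (keywords : List String) (rest : List String) (cd : Nat) (hcd : cd ≤ 2) :
    pvLoopB keywords rest cd = pvG keywords rest cd := by
  induction rest generalizing cd with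
  | nil => cases cd <;> simp [pvLoopB, pvG, pvInnerA, pvOuterA]
  | cons l rs ih =>
    by_cases hkw : pvMatchA keywords l
    · have hB : pvLoopB keywords (l :: rs) cd = pvLoopB keywords rs 2 := by
        simp only [pvLoopB]
        rw [if_pos (by simpa [pvMatchA] using hkw)]
      rw [hB, ih 2 (by omega)]
      have houter : pvOuterA keywords (l :: rs) = pvG keywords rs 2 := by
        simp only [pvOuterA, pvG]
        rw [if_pos hkw]
      cases cd with
      | zero => simp [pvG, pvInnerA, houter]
      | succ k =>
        simp only [pvG, List.take_succ_cons, pvInnerA]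
        rw [if_pos hkw, houter]
        cases hin : pvInnerA keywords (rs.take k) with
        | none => simp [pvG]
        | some r =>
          have h2 : pvInnerA keywords (rs.take 2) = some r :=
            pvInnerA_mono keywords rs k 2 (by omega) r hin
          simp [h2]
    · have hB : pvLoopB keywords (l :: rs) cd =
          (if cd > 0 then
            (if l.toList.any PySem.Chars.isdigit then pvLoopB keywords rs (cd - 1)
             else some (PySem.Str.strip l))
           else pvLoopB keywords rs cd) := by
        simp only [pvLoopB]
        rw [if_neg (by simpa [pvMatchA] using hkw)]
      have houter : pvOuterA keywords (l :: rs) = pvOuterA keywords rs := by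
        simp only [pvOuterA]; rw [if_neg hkw]
      rw [hB]
      cases cd with
      | zero =>
        simpa [pvG, pvInnerA, houter] using ih 0 (by omega)
      | succ k =>
        rw [if_pos (by omega)]
        by_cases hd : l.toList.any PySem.Chars.isdigit
        · rw [if_pos hd, show k + 1 - 1 = k from rfl, ih k (by omega)]
          simp only [pvG, List.take_succ_cons, pvInnerA]
          rw [if_neg hkw, if_pos (by simpa [pvDigitsA] using hd), houter]
        · rw [if_neg hd]
          simp only [pvG, List.take_succ_cons, pvInnerA]
          rw [if_neg hkw, if_neg (by simpa [pvDigitsA] using hd)]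

-- ===== VERDICT (by name: the statement is the Claim_ definition above) =====
theorem extract_after_keyword_py_spec : Claim_equal_extract_after_keyword_py := by
  intro lines keywords _
  unfold Spec_extract_after_keyword_py extract_after_keyword_py extract_after_keyword_py_alt
  rw [pvLoopB_eq_pvG keywords lines 0 (by omega)]
  simp [pvG, pvInnerA]
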